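-- pv_equiv track=rewrite | github.com/asynkron/Asynkron.TextLayout | src/textlayout/parser.py | split_vertical
-- ===== SOURCE A (Python) =====
-- def is_blank_col(
--     matrix: list[list[str]], col: int, start_row: int, end_row: int
-- ) -> bool:
--     """Check if a column is entirely whitespace within the row range."""
--     return all(matrix[r][col] in (" ", "") for r in range(start_row, end_row + 1))
--
-- def find_vertical_gaps(
--     matrix: list[list[str]], start_row: int, end_row: int, min_gap: int
-- ) -> list[tuple[int, int]]:
--     """Find vertical whitespace gaps within a row range."""
--     if not matrix or not matrix[0]:
--         return []
--
--     width = len(matrix[0])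
--     gaps = []
--     in_gap = False
--     gap_start = 0
--
--     for c in range(width):
--         if is_blank_col(matrix, c, start_row, end_row):
--             if not in_gap:
--                 gap_start = c
--                 in_gap = True
--         elif in_gap:
--             if c - gap_start >= min_gap:
--                 gaps.append((gap_start, c - 1))
--             in_gap = False
--
--     return gaps
--
-- def find_text_bounds(
--     matrix: list[list[str]], start_row: int, end_row: int, start_col: int, end_col: int
-- ) -> tuple[int, int] | None:
--     """Find actual text bounds within a region. Returns (min_col, max_col) or None."""
--     min_c, max_c = end_col + 1, start_col - 1
--     for r in range(start_row, end_row + 1):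
--         for c in range(start_col, end_col):
--             if matrix[r][c] not in (" ", ""):
--                 min_c = min(min_c, c)
--                 max_c = max(max_c, c)
--     return (min_c, max_c) if max_c >= min_c else None
--
-- def split_vertical(
--     matrix: list[list[str]], start_row: int, end_row: int, min_gap: int
-- ) -> list[tuple[int, int]]:
--     """Split a section into vertical columns based on whitespace gaps."""
--     if not matrix or not matrix[0]:
--         return []
--
--     width = len(matrix[0])
--     gaps = find_vertical_gaps(matrix, start_row, end_row, min_gap)
--
--     if not gaps:
--         bounds = find_text_bounds(matrix, start_row, end_row, 0, width)
--         return [bounds] if bounds else []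
--
--     columns = []
--     prev_end = 0
--
--     for gap_start, gap_end in gaps:
--         bounds = find_text_bounds(matrix, start_row, end_row, prev_end, gap_start)
--         if bounds:
--             columns.append(bounds)
--         prev_end = gap_end + 1
--
--     # Last column
--     if prev_end < width:
--         bounds = find_text_bounds(matrix, start_row, end_row, prev_end, width)
--         if bounds:
--             columns.append(bounds)
--
--     return columns
-- ===== SOURCE B (Python) =====
-- def _col_blank(matrix, c, start_row, end_row):
--     """True if column c is entirely whitespace within the row range."""
--     return all(matrix[r][c] in (" ", "") for r in range(start_row, end_row + 1))
--
-- def split_vertical(matrix, start_row, end_row, min_gap):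
--     """Split a section into vertical columns based on whitespace gaps.
--
--     Single left-to-right scan over columns: tracks the current segment's
--     first/last non-blank column and the current blank run; a blank run of
--     length >= min_gap ending at a non-blank column flushes the segment.
--     """
--     if not matrix or not matrix[0]:
--         return []
--     width = len(matrix[0])
--     columns = []
--     min_c = max_c = 0
--     seen = False
--     in_gap = False
--     gap_start = 0
--     for c in range(width):
--         if _col_blank(matrix, c, start_row, end_row):
--             if not in_gap:
--                 gap_start = c
--                 in_gap = True
--         else:
--             if in_gap:
--                 if c - gap_start >= min_gap and seen:
--                     columns.append((min_c, max_c))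
--                     seen = False
--                 in_gap = False
--             if not seen:
--                 min_c = max_c = c
--                 seen = True
--             else:
--                 max_c = c
--     if seen:
--         columns.append((min_c, max_c))
--     return columns
-- ===== Notes on version B (the rewrite author's own statement) =====
-- stated objective: simpler
-- what changed: Replaces A's three-phase structure (find all vertical gaps, then re-scan every segment's cells with find_text_bounds, plus a separate no-gap branch) by one fused left-to-right column scan that simultaneously tracks the blank-run and the current segment's first/last non-blank column, flushing a segment when a qualifying gap ends.
import Mathlib
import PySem

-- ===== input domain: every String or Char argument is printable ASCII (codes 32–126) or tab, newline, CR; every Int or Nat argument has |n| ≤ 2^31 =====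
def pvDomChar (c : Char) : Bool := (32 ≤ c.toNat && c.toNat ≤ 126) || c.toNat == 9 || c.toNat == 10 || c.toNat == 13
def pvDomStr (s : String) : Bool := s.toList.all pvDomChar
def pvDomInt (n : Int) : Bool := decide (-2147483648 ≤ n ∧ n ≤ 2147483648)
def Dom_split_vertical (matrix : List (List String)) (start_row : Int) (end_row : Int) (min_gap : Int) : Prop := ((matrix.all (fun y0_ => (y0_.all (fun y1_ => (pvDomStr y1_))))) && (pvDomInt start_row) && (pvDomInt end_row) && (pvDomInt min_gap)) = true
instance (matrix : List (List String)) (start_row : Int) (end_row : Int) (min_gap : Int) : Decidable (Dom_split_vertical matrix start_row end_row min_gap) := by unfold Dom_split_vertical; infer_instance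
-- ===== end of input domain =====

-- B fuses A's gap-finding pass and per-segment bounds passes into one left-to-right column scan (simpler: one loop, each cell read once).
-- Pre_ excludes exactly the inputs where Python A raises IndexError (a row index of the scanned range out of range, or a scanned row shorter than the first row).


-- ===== PORT A =====
def is_blank_col (matrix : List (List String)) (col : Int) (start_row : Int) (end_row : Int) : Bool :=
  (PySem.List.pyRange start_row (end_row + 1) 1).all (fun r =>
    let v := PySem.List.pyGetD (PySem.List.pyGetD matrix r []) col ""
    v == " " || v == "")

def find_vertical_gaps (matrix : List (List String)) (start_row : Int) (end_row : Int) (min_gap : Int) : List (Int × Int) :=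
  if matrix = [] ∨ matrix.headD [] = [] then []
  else
    let width : Int := ((matrix.headD []).length : Int)
    let st := (PySem.List.pyRange 0 width 1).foldl
      (fun (st : List (Int × Int) × Bool × Int) c =>
        if is_blank_col matrix c start_row end_row then
          if !st.2.1 then (st.1, true, c) else st
        else if st.2.1 then
          ((if c - st.2.2 ≥ min_gap then st.1 ++ [(st.2.2, c - 1)] else st.1), false, st.2.2)
        else st)
      ([], false, 0)
    st.1

def find_text_bounds (matrix : List (List String)) (start_row : Int) (end_row : Int) (start_col : Int) (end_col : Int) : Option (Int × Int) :=
  let st := (PySem.List.pyRange start_row (end_row + 1) 1).foldl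
    (fun (st : Int × Int) r =>
      (PySem.List.pyRange start_col end_col 1).foldl
        (fun (st : Int × Int) c =>
          let v := PySem.List.pyGetD (PySem.List.pyGetD matrix r []) c ""
          if !(v == " " || v == "") then (min st.1 c, max st.2 c) else st)
        st)
    (end_col + 1, start_col - 1)
  if st.2 ≥ st.1 then some st else none

def split_vertical (matrix : List (List String)) (start_row : Int) (end_row : Int) (min_gap : Int) : List (Int × Int) :=
  if matrix = [] ∨ matrix.headD [] = [] then []
  else
    let width : Int := ((matrix.headD []).length : Int)
    let gaps := find_vertical_gaps matrix start_row end_row min_gap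
    if gaps = [] then
      match find_text_bounds matrix start_row end_row 0 width with
      | some b => [b]
      | none => []
    else
      let st := gaps.foldl
        (fun (st : List (Int × Int) × Int) gp =>
          ((match find_text_bounds matrix start_row end_row st.2 gp.1 with
            | some b => st.1 ++ [b]
            | none => st.1), gp.2 + 1))
        ([], 0)
      if st.2 < width then
        match find_text_bounds matrix start_row end_row st.2 width with
        | some b => st.1 ++ [b]
        | none => st.1
      else st.1

-- ===== PORT B =====
def col_blank (matrix : List (List String)) (c : Int) (start_row : Int) (end_row : Int) : Bool :=
  (PySem.List.pyRange start_row (end_row + 1) 1).all (fun r =>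
    let v := PySem.List.pyGetD (PySem.List.pyGetD matrix r []) c ""
    v == " " || v == "")

-- state: (columns, min_c, max_c, seen, in_gap, gap_start)
def split_vertical_alt (matrix : List (List String)) (start_row : Int) (end_row : Int) (min_gap : Int) : List (Int × Int) :=
  if matrix = [] ∨ matrix.headD [] = [] then []
  else
    let width : Int := ((matrix.headD []).length : Int)
    let st := (PySem.List.pyRange 0 width 1).foldl
      (fun (st : List (Int × Int) × Int × Int × Bool × Bool × Int) c =>
        if col_blank matrix c start_row end_row then
          if !st.2.2.2.2.1 then (st.1, st.2.1, st.2.2.1, st.2.2.2.1, true, c) else st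
        else
          let st1 :=
            if st.2.2.2.2.1 then
              (if c - st.2.2.2.2.2 ≥ min_gap ∧ st.2.2.2.1 = true then
                 (st.1 ++ [(st.2.1, st.2.2.1)], st.2.1, st.2.2.1, false, false, st.2.2.2.2.2)
               else (st.1, st.2.1, st.2.2.1, st.2.2.2.1, false, st.2.2.2.2.2))
            else st
          if !st1.2.2.2.1 then (st1.1, c, c, true, st1.2.2.2.2.1, st1.2.2.2.2.2)
          else (st1.1, st1.2.1, c, st1.2.2.2.1, st1.2.2.2.2.1, st1.2.2.2.2.2))
      ([], 0, 0, false, false, 0)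
    if st.2.2.2.1 then st.1 ++ [(st.2.1, st.2.2.1)] else st.1

-- ===== PRECONDITION & SPEC =====
-- Pre_: exactly the inputs on which Python A returns (no IndexError): every row index in
-- range(start_row, end_row+1) is a valid (possibly negative) index into matrix, and the row
-- it selects is at least as long as the first row.  Vacuously true for an empty matrix, an
-- empty first row, or an empty row range.
def Pre_split_vertical (matrix : List (List String)) (start_row : Int) (end_row : Int) (min_gap : Int) : Prop :=
  (if matrix = [] then True
   else if matrix.headD [] = [] then True
   else if end_row < start_row then True
   else if -(matrix.length : Int) ≤ start_row ∧ end_row < (matrix.length : Int) then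
     ∀ r ∈ PySem.List.pyRange start_row (end_row + 1) 1,
       (matrix.headD []).length ≤ (PySem.List.pyGetD matrix r []).length
   else False)
instance (matrix : List (List String)) (start_row : Int) (end_row : Int) (min_gap : Int) : Decidable (Pre_split_vertical matrix start_row end_row min_gap) := by unfold Pre_split_vertical; infer_instance

def pvWitness_split_vertical : List (List String) × Int × Int × Int :=
  ([[" ", "x", " ", " ", "a"], ["y", " ", " ", " ", "b"]], 0, 1, 2)

def Spec_split_vertical (matrix : List (List String)) (start_row : Int) (end_row : Int) (min_gap : Int) (out : List (Int × Int)) : Prop := out = split_vertical_alt matrix start_row end_row min_gap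
instance (matrix : List (List String)) (start_row : Int) (end_row : Int) (min_gap : Int) (out : List (Int × Int)) : Decidable (Spec_split_vertical matrix start_row end_row min_gap out) := by unfold Spec_split_vertical; infer_instance

-- ===== CLAIM (what is proved, stated in full; the proofs are below) =====
def Claim_equal_split_vertical : Prop := ∀ (matrix : List (List String)) (start_row : Int) (end_row : Int) (min_gap : Int), Dom_split_vertical matrix start_row end_row min_gap → Pre_split_vertical matrix start_row end_row min_gap → Spec_split_vertical matrix start_row end_row min_gap (split_vertical matrix start_row end_row min_gap)

-- ===== LEMMAS AND PROOFS =====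

-- Abbreviations for the two ports' loop bodies (definitionally equal to the inline lambdas).
def nbCell (matrix : List (List String)) (r c : Int) : Bool :=
  !((PySem.List.pyGetD (PySem.List.pyGetD matrix r []) c "" == " ") ||
    (PySem.List.pyGetD (PySem.List.pyGetD matrix r []) c "" == ""))

def segCols (matrix : List (List String)) (s e a b : Int) : List Int :=
  (PySem.List.pyRange a b 1).filter (fun c => !is_blank_col matrix c s e)

def segOpt (matrix : List (List String)) (s e a b : Int) : Option (Int × Int) :=
  match segCols matrix s e a b with
  | [] => none
  | x :: t => some (x, (x :: t).getLast (by simp))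

def aStep (matrix : List (List String)) (s e g : Int)
    (st : List (Int × Int) × Bool × Int) (c : Int) : List (Int × Int) × Bool × Int :=
  if is_blank_col matrix c s e then
    if !st.2.1 then (st.1, true, c) else st
  else if st.2.1 then
    ((if c - st.2.2 ≥ g then st.1 ++ [(st.2.2, c - 1)] else st.1), false, st.2.2)
  else st

def ph2Step (matrix : List (List String)) (s e : Int)
    (st : List (Int × Int) × Int) (gp : Int × Int) : List (Int × Int) × Int :=
  ((match find_text_bounds matrix s e st.2 gp.1 with
    | some b => st.1 ++ [b]
    | none => st.1), gp.2 + 1)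

def bStep (matrix : List (List String)) (s e g : Int)
    (st : List (Int × Int) × Int × Int × Bool × Bool × Int) (c : Int) :
    List (Int × Int) × Int × Int × Bool × Bool × Int :=
  if col_blank matrix c s e then
    if !st.2.2.2.2.1 then (st.1, st.2.1, st.2.2.1, st.2.2.2.1, true, c) else st
  else
    let st1 :=
      if st.2.2.2.2.1 then
        (if c - st.2.2.2.2.2 ≥ g ∧ st.2.2.2.1 = true then
           (st.1 ++ [(st.2.1, st.2.2.1)], st.2.1, st.2.2.1, false, false, st.2.2.2.2.2)
         else (st.1, st.2.1, st.2.2.1, st.2.2.2.1, false, st.2.2.2.2.2))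
      else st
    if !st1.2.2.2.1 then (st1.1, c, c, true, st1.2.2.2.2.1, st1.2.2.2.2.2)
    else (st1.1, st1.2.1, c, st1.2.2.2.1, st1.2.2.2.2.1, st1.2.2.2.2.2)

def ph1 (matrix : List (List String)) (s e g : Int) (cs : List Int) :
    List (Int × Int) × Bool × Int := cs.foldl (aStep matrix s e g) ([], false, 0)

def ph2 (matrix : List (List String)) (s e : Int) (gaps : List (Int × Int)) :
    List (Int × Int) × Int := gaps.foldl (ph2Step matrix s e) ([], 0)

def bfold (matrix : List (List String)) (s e g : Int) (cs : List Int) :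
    List (Int × Int) × Int × Int × Bool × Bool × Int :=
  cs.foldl (bStep matrix s e g) ([], 0, 0, false, false, 0)

theorem col_blank_eq (matrix : List (List String)) (c s e : Int) :
    col_blank matrix c s e = is_blank_col matrix c s e := rfl

theorem fvg_eq (matrix : List (List String)) (s e g : Int)
    (h : ¬ (matrix = [] ∨ matrix.headD [] = [])) :
    find_vertical_gaps matrix s e g =
      (ph1 matrix s e g (PySem.List.pyRange 0 ((matrix.headD []).length : Int) 1)).1 := by
  rw [find_vertical_gaps, if_neg h]; rfl

theorem alt_eq (matrix : List (List String)) (s e g : Int)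
    (h : ¬ (matrix = [] ∨ matrix.headD [] = [])) :
    split_vertical_alt matrix s e g =
      (let st := bfold matrix s e g (PySem.List.pyRange 0 ((matrix.headD []).length : Int) 1)
       if st.2.2.2.1 then st.1 ++ [(st.2.1, st.2.2.1)] else st.1) := by
  rw [split_vertical_alt, if_neg h]; rfl

-- ===== find_text_bounds characterisation =====

theorem foldl_min_congr (l1 l2 : List Int) (a : Int) (h : ∀ x, x ∈ l1 ↔ x ∈ l2) :
    l1.foldl min a = l2.foldl min a := by
  apply le_antisymm
  · rcases PySem.List.foldl_min_mem l2 a with h2 | h2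
    · rw [h2]; exact (PySem.List.foldl_min_le l1 a).1
    · exact (PySem.List.foldl_min_le l1 a).2 _ ((h _).2 h2)
  · rcases PySem.List.foldl_min_mem l1 a with h1 | h1
    · rw [h1]; exact (PySem.List.foldl_min_le l2 a).1
    · exact (PySem.List.foldl_min_le l2 a).2 _ ((h _).1 h1)

theorem foldl_max_congr (l1 l2 : List Int) (a : Int) (h : ∀ x, x ∈ l1 ↔ x ∈ l2) :
    l1.foldl max a = l2.foldl max a := by
  apply le_antisymm
  · rcases PySem.List.foldl_max_mem l1 a with h1 | h1
    · rw [h1]; exact (PySem.List.le_foldl_max l2 a).1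
    · exact (PySem.List.le_foldl_max l2 a).2 _ ((h _).1 h1)
  · rcases PySem.List.foldl_max_mem l2 a with h2 | h2
    · rw [h2]; exact (PySem.List.le_foldl_max l1 a).1
    · exact (PySem.List.le_foldl_max l1 a).2 _ ((h _).2 h2)

theorem inner_fold (matrix : List (List String)) (r : Int) (C : List Int) :
    ∀ m M : Int,
      C.foldl (fun (st : Int × Int) c =>
          if nbCell matrix r c then (min st.1 c, max st.2 c) else st) (m, M) =
        ((C.filter (nbCell matrix r)).foldl min m, (C.filter (nbCell matrix r)).foldl max M) := by
  induction C with
  | nil => intro m M; simp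
  | cons c t ih =>
    intro m M
    by_cases hc : nbCell matrix r c
    · simp [hc, ih]
    · simp [hc, ih]

theorem outer_fold (matrix : List (List String)) (R C : List Int) :
    ∀ m M : Int,
      R.foldl (fun (st : Int × Int) r =>
          C.foldl (fun (st : Int × Int) c =>
            if nbCell matrix r c then (min st.1 c, max st.2 c) else st) st) (m, M) =
        ((R.flatMap (fun r => C.filter (nbCell matrix r))).foldl min m,
         (R.flatMap (fun r => C.filter (nbCell matrix r))).foldl max M) := by
  induction R with
  | nil => intro m M; simp
  | cons r t ih =>
    intro m M
    simp only [List.foldl_cons, inner_fold, List.flatMap_cons, List.foldl_append]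
    exact ih _ _

theorem pairwise_head_le {l : List Int} (hp : l.Pairwise (· < ·)) :
    ∀ x ∈ l, ∀ h : l ≠ [], l.head h ≤ x := by
  cases l with
  | nil => intro x hx h; exact absurd rfl h
  | cons a t =>
    intro x hx h
    rcases List.mem_cons.1 hx with rfl | hx
    · simp
    · exact le_of_lt ((List.pairwise_cons.1 hp).1 x hx)

theorem pairwise_le_getLast {l : List Int} (hp : l.Pairwise (· < ·)) :
    ∀ x ∈ l, ∀ h : l ≠ [], x ≤ l.getLast h := by
  induction l with
  | nil => intro x hx; simp at hx
  | cons a t ih =>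
    intro x hx h
    cases t with
    | nil => simp at hx; simp [hx]
    | cons b u =>
      have ih' := ih (List.pairwise_cons.1 hp).2
      rcases List.mem_cons.1 hx with rfl | hx
      · rw [List.getLast_cons (by simp)]
        calc x ≤ b := le_of_lt ((List.pairwise_cons.1 hp).1 b (by simp))
        _ ≤ (b :: u).getLast (by simp) := ih' b (by simp) _
      · rw [List.getLast_cons (by simp)]
        exact ih' x hx _

theorem sorted_foldl_min {l : List Int} (hp : l.Pairwise (· < ·)) (a : Int)
    (hne : l ≠ []) (ha : ∀ x ∈ l, x < a) : l.foldl min a = l.head hne := by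
  have hle : l.foldl min a ≤ l.head hne := (PySem.List.foldl_min_le l a).2 _ (List.head_mem hne)
  rcases PySem.List.foldl_min_mem l a with h | h
  · exact absurd (h ▸ hle) (not_le.2 (ha _ (List.head_mem hne)))
  · exact le_antisymm hle (pairwise_head_le hp _ h hne)

theorem sorted_foldl_max {l : List Int} (hp : l.Pairwise (· < ·)) (a : Int)
    (hne : l ≠ []) (ha : ∀ x ∈ l, a < x) : l.foldl max a = l.getLast hne := by
  have hle : l.getLast hne ≤ l.foldl max a := (PySem.List.le_foldl_max l a).2 _ (List.getLast_mem hne)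
  rcases PySem.List.foldl_max_mem l a with h | h
  · exact absurd (h ▸ hle) (not_le.2 (ha _ (List.getLast_mem hne)))
  · exact le_antisymm (pairwise_le_getLast hp _ h hne) hle

theorem segCols_pairwise (matrix : List (List String)) (s e a b : Int) :
    (segCols matrix s e a b).Pairwise (· < ·) :=
  (PySem.List.pairwise_lt_pyRange_one a b).filter _

theorem segCols_mem (matrix : List (List String)) {s e a b x : Int}
    (h : x ∈ segCols matrix s e a b) : a ≤ x ∧ x < b ∧ is_blank_col matrix x s e = false := by
  rcases List.mem_filter.1 h with ⟨h1, h2⟩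
  rcases PySem.List.mem_pyRange_one.1 h1 with ⟨ha, hb⟩
  exact ⟨ha, hb, by simpa using h2⟩

theorem segCols_flatMap (matrix : List (List String)) (s e a b x : Int) :
    (x ∈ (PySem.List.pyRange s (e + 1) 1).flatMap
        (fun r => (PySem.List.pyRange a b 1).filter (nbCell matrix r))) ↔
      x ∈ segCols matrix s e a b := by
  simp only [List.mem_flatMap, List.mem_filter, segCols, is_blank_col]
  constructor
  · rintro ⟨r, hr, hx, hnb⟩
    refine ⟨hx, ?_⟩
    simp only [Bool.not_eq_eq_eq_not, Bool.not_true, List.all_eq_false]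
    exact ⟨r, hr, by simpa [nbCell] using hnb⟩
  · rintro ⟨hx, hall⟩
    simp only [Bool.not_eq_eq_eq_not, Bool.not_true, List.all_eq_false] at hall
    rcases hall with ⟨r, hr, hv⟩
    exact ⟨r, hr, hx, by simpa [nbCell] using hv⟩

theorem ftb_eq (matrix : List (List String)) (s e a b : Int) (hab : a ≤ b) :
    find_text_bounds matrix s e a b = segOpt matrix s e a b := by
  have hfold :
      find_text_bounds matrix s e a b =
        (let st := (PySem.List.pyRange s (e + 1) 1).foldl
            (fun (st : Int × Int) r =>
              (PySem.List.pyRange a b 1).foldl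
                (fun (st : Int × Int) c =>
                  if nbCell matrix r c then (min st.1 c, max st.2 c) else st) st)
            (b + 1, a - 1)
         if st.2 ≥ st.1 then some st else none) := rfl
  rw [hfold]
  rw [outer_fold]
  have hmin := foldl_min_congr _ (segCols matrix s e a b) (b + 1)
    (fun x => segCols_flatMap matrix s e a b x)
  have hmax := foldl_max_congr _ (segCols matrix s e a b) (a - 1)
    (fun x => segCols_flatMap matrix s e a b x)
  simp only [hmin, hmax]
  rcases hl : segCols matrix s e a b with _ | ⟨x, t⟩
  · simp only [List.foldl_nil]
    rw [if_neg (by omega)]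
    simp [segOpt, hl]
  · have hp : (x :: t).Pairwise (· < ·) := hl ▸ segCols_pairwise matrix s e a b
    have hne : (x :: t) ≠ [] := by simp
    have hmembounds : ∀ y ∈ x :: t, a ≤ y ∧ y < b := by
      intro y hy
      have := segCols_mem matrix (hl ▸ hy)
      exact ⟨this.1, this.2.1⟩
    rw [sorted_foldl_min hp _ hne (fun y hy => by have := (hmembounds y hy).2; omega),
        sorted_foldl_max hp _ hne (fun y hy => by have := (hmembounds y hy).1; omega)]
    rw [if_pos]
    · simp [segOpt, hl]
    · have h1 : (x :: t).head hne ≤ (x :: t).getLast hne :=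
        pairwise_le_getLast hp _ (List.head_mem hne) hne
      simpa using h1

-- ===== segCols bookkeeping =====

theorem segCols_nil (matrix : List (List String)) (s e a b : Int) (h : b ≤ a) :
    segCols matrix s e a b = [] := by
  simp [segCols, PySem.List.pyRange_one_eq_nil h]

theorem segCols_split (matrix : List (List String)) (s e a m b : Int)
    (h1 : a ≤ m) (h2 : m ≤ b) :
    segCols matrix s e a b = segCols matrix s e a m ++ segCols matrix s e m b := by
  simp [segCols, PySem.List.pyRange_one_append a m b h1 h2, List.filter_append]

theorem segCols_succ_blank (matrix : List (List String)) (s e a b : Int)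
    (hab : a ≤ b) (hb : is_blank_col matrix b s e = true) :
    segCols matrix s e a (b + 1) = segCols matrix s e a b := by
  rw [segCols_split matrix s e a b (b + 1) hab (by omega)]
  simp [segCols, PySem.List.pyRange_one_singleton, hb]

theorem segCols_succ_nb (matrix : List (List String)) (s e a b : Int)
    (hab : a ≤ b) (hb : is_blank_col matrix b s e = false) :
    segCols matrix s e a (b + 1) = segCols matrix s e a b ++ [b] := by
  rw [segCols_split matrix s e a b (b + 1) hab (by omega)]
  simp [segCols, PySem.List.pyRange_one_singleton, hb]

theorem segCols_single_nb (matrix : List (List String)) (s e b : Int)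
    (hb : is_blank_col matrix b s e = false) :
    segCols matrix s e b (b + 1) = [b] := by
  simp [segCols, PySem.List.pyRange_one_singleton, hb]

-- ===== the master invariant =====

def SVInv (matrix : List (List String)) (s e g : Int) (w : Nat) : Prop :=
  let G := ph1 matrix s e g (PySem.List.pyRange 0 (w : Int) 1)
  let B := bfold matrix s e g (PySem.List.pyRange 0 (w : Int) 1)
  let C := ph2 matrix s e G.1
  B.2.2.2.2.1 = G.2.1 ∧ B.2.2.2.2.2 = G.2.2 ∧ B.1 = C.1 ∧
  ((G.1 = [] ∧ C.2 = 0) ∨ (G.1 ≠ [] ∧ 1 ≤ C.2 ∧ C.2 < (w : Int))) ∧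
  (G.2.1 = true → C.2 ≤ G.2.2 ∧ G.2.2 < (w : Int) ∧ segCols matrix s e G.2.2 (w : Int) = []) ∧
  (B.2.2.2.1 = true ↔ segCols matrix s e C.2 (w : Int) ≠ []) ∧
  (∀ x t, segCols matrix s e C.2 (w : Int) = x :: t →
    B.2.1 = x ∧ B.2.2.1 = (x :: t).getLast (by simp))

theorem ph1_append (matrix : List (List String)) (s e g : Int) (cs : List Int) (c : Int) :
    ph1 matrix s e g (cs ++ [c]) = aStep matrix s e g (ph1 matrix s e g cs) c := by
  simp [ph1, List.foldl_append]

theorem bfold_append (matrix : List (List String)) (s e g : Int) (cs : List Int) (c : Int) :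
    bfold matrix s e g (cs ++ [c]) = bStep matrix s e g (bfold matrix s e g cs) c := by
  simp [bfold, List.foldl_append]

theorem ph2_append (matrix : List (List String)) (s e : Int) (gaps : List (Int × Int)) (gp : Int × Int) :
    ph2 matrix s e (gaps ++ [gp]) = ph2Step matrix s e (ph2 matrix s e gaps) gp := by
  simp [ph2, List.foldl_append]

theorem getLast_snoc (x c : Int) (t : List Int) :
    (x :: (t ++ [c])).getLast (by simp) = c := by
  simp

theorem inv_all (matrix : List (List String)) (s e g : Int) (w : Nat) :
    SVInv matrix s e g w := by
  induction w with
  | zero =>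
    unfold SVInv
    rw [Nat.cast_zero, PySem.List.pyRange_one_eq_nil le_rfl]
    refine ⟨rfl, rfl, rfl, Or.inl ⟨rfl, rfl⟩, by simp [ph1], ?_, ?_⟩
    · simp [bfold, ph2, ph1, segCols_nil matrix s e 0 0 le_rfl]
    · intro x t h
      rw [show (ph2 matrix s e (ph1 matrix s e g []).1).2 = 0 from rfl] at h
      rw [segCols_nil matrix s e 0 0 le_rfl] at h
      cases h
  | succ w ih =>
    unfold SVInv at ih ⊢
    obtain ⟨hig, hgs, hout, hdisj, higinv, hseen, hvals⟩ := ih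
    have hw0 : (0 : Int) ≤ (w : Int) := Int.natCast_nonneg w
    rw [show ((w + 1 : Nat) : Int) = (w : Int) + 1 by push_cast; ring,
        PySem.List.pyRange_one_succ_right hw0, ph1_append, bfold_append]
    rcases hG : ph1 matrix s e g (PySem.List.pyRange 0 (w : Int) 1) with ⟨Gg, Gig, Ggs⟩
    rw [hG] at hig hgs hout hdisj higinv hseen hvals
    rcases hB : bfold matrix s e g (PySem.List.pyRange 0 (w : Int) 1) with ⟨Bo, Bm, BM, Bs, Bi, Bg⟩
    rw [hB] at hig hgs hout hseen hvals
    rcases hC : ph2 matrix s e Gg with ⟨Cc, CP⟩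
    rw [hC] at hout hdisj higinv hseen hvals
    simp only at hig hgs hout hdisj higinv hseen hvals
    obtain rfl : Bi = Gig := hig
    obtain rfl : Bg = Ggs := hgs
    obtain rfl : Bo = Cc := hout
    have hCP0 : 0 ≤ CP := by rcases hdisj with ⟨-, h⟩ | ⟨-, h, -⟩ <;> omega
    have hCPw : CP ≤ (w : Int) := by rcases hdisj with ⟨-, h⟩ | ⟨-, -, h⟩ <;> omega
    cases hb : is_blank_col matrix (w : Int) s e with
    | true =>
      cases hBi : Bi with
      | false =>
        simp only [aStep, bStep, col_blank_eq, hb, Bool.not_false, if_true, hC]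
        refine ⟨trivial, trivial, trivial, ?_, ?_, ?_, ?_⟩
        · rcases hdisj with ⟨h1, h2⟩ | ⟨h1, h2, h3⟩
          · exact Or.inl ⟨h1, h2⟩
          · exact Or.inr ⟨h1, h2, by omega⟩
        · intro _
          refine ⟨hCPw, by omega, ?_⟩
          rw [segCols_succ_blank matrix s e _ _ le_rfl hb]
          exact segCols_nil matrix s e _ _ le_rfl
        · rw [segCols_succ_blank matrix s e CP (w : Int) hCPw hb]; exact hseen
        · intro x t h
          exact hvals x t (by rwa [segCols_succ_blank matrix s e CP (w : Int) hCPw hb] at h)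
      | true =>
        obtain ⟨hPle, hGlt, hblank⟩ := higinv hBi
        simp [aStep, bStep, col_blank_eq, hb, hC]
        refine ⟨?_, ⟨hPle, by omega, ?_⟩, ?_, ?_⟩
        · rcases hdisj with ⟨h1, h2⟩ | ⟨h1, h2, h3⟩
          · exact Or.inl ⟨h1, h2⟩
          · exact Or.inr ⟨h1, h2, by omega⟩
        · rw [segCols_succ_blank matrix s e Bg (w : Int) (le_of_lt hGlt) hb]; exact hblank
        · rw [segCols_succ_blank matrix s e CP (w : Int) hCPw hb]; exact hseen
        · intro x t h
          exact hvals x t (by rwa [segCols_succ_blank matrix s e CP (w : Int) hCPw hb] at h)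
    | false =>
      have hnew : segCols matrix s e CP ((w : Int) + 1) = segCols matrix s e CP (w : Int) ++ [(w : Int)] :=
        segCols_succ_nb matrix s e CP (w : Int) hCPw hb
      cases hBi : Bi with
      | false =>
        cases hBs : Bs with
        | false =>
          have hold : segCols matrix s e CP (w : Int) = [] := by
            by_contra hne
            have := hseen.2 hne
            rw [hBs] at this
            cases this
          simp [aStep, bStep, col_blank_eq, hb, hC]
          refine ⟨?_, ?_, ?_⟩
          · rcases hdisj with ⟨h1, h2⟩ | ⟨h1, h2, h3⟩
            · exact Or.inl ⟨h1, h2⟩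
            · exact Or.inr ⟨h1, h2, by omega⟩
          · rw [hnew, hold]; simp
          · intro x t h
            rw [hnew, hold] at h
            simp only [List.nil_append, List.cons.injEq] at h
            obtain ⟨h1, h2⟩ := h
            subst h1; subst h2
            exact ⟨rfl, by simp⟩
        | true =>
          rcases hsc : segCols matrix s e CP (w : Int) with _ | ⟨x0, t0⟩
          · exact absurd hsc (hseen.1 hBs)
          obtain ⟨hBm, hBM⟩ := hvals x0 t0 hsc
          simp [aStep, bStep, col_blank_eq, hb, hC]
          refine ⟨?_, ?_, ?_⟩
          · rcases hdisj with ⟨h1, h2⟩ | ⟨h1, h2, h3⟩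
            · exact Or.inl ⟨h1, h2⟩
            · exact Or.inr ⟨h1, h2, by omega⟩
          · rw [hnew, hsc]; simp
          · intro x t h
            rw [hnew, hsc] at h
            simp only [List.cons_append, List.cons.injEq] at h
            obtain ⟨h1, h2⟩ := h
            subst h1; subst h2
            exact ⟨hBm, (getLast_snoc x0 (w : Int) t0).symm⟩
      | true =>
        obtain ⟨hPle, hGlt, hblank⟩ := higinv hBi
        have hPw : segCols matrix s e CP (w : Int) = segCols matrix s e CP Bg := by
          rw [segCols_split matrix s e CP Bg (w : Int) hPle (le_of_lt hGlt), hblank, List.append_nil]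
        have harith : (w : Int) - 1 + 1 = (w : Int) := by ring
        by_cases hrun : (w : Int) - Bg ≥ g
        · cases hBs : Bs with
          | false =>
            have hold : segCols matrix s e CP (w : Int) = [] := by
              by_contra hne
              have := hseen.2 hne
              rw [hBs] at this
              cases this
            have hPB : segCols matrix s e CP Bg = [] := by rw [← hPw]; exact hold
            have hC' : ph2 matrix s e (Gg ++ [(Bg, (w : Int) - 1)]) = (Bo, (w : Int)) := by
              rw [ph2_append, hC]
              unfold ph2Step
              rw [ftb_eq matrix s e CP Bg hPle]
              unfold segOpt
              rw [hPB, harith]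
            simp [aStep, bStep, col_blank_eq, hb, hrun, hC']
            refine ⟨by omega, ?_, ?_⟩
            · rw [segCols_single_nb matrix s e (w : Int) hb]; simp
            · intro x t h
              rw [segCols_single_nb matrix s e (w : Int) hb] at h
              simp only [List.cons.injEq] at h
              obtain ⟨h1, h2⟩ := h
              subst h1; subst h2
              exact ⟨rfl, by simp⟩
          | true =>
            rcases hsc : segCols matrix s e CP (w : Int) with _ | ⟨x0, t0⟩
            · exact absurd hsc (hseen.1 hBs)
            obtain ⟨hBm, hBM⟩ := hvals x0 t0 hsc
            have hPB : segCols matrix s e CP Bg = x0 :: t0 := by rw [← hPw]; exact hsc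
            have hC' : ph2 matrix s e (Gg ++ [(Bg, (w : Int) - 1)]) = (Bo ++ [(Bm, BM)], (w : Int)) := by
              rw [ph2_append, hC]
              unfold ph2Step
              rw [ftb_eq matrix s e CP Bg hPle]
              unfold segOpt
              rw [hPB, harith, hBm, hBM]
            simp [aStep, bStep, col_blank_eq, hb, hrun, hC']
            refine ⟨by omega, ?_, ?_⟩
            · rw [segCols_single_nb matrix s e (w : Int) hb]; simp
            · intro x t h
              rw [segCols_single_nb matrix s e (w : Int) hb] at h
              simp only [List.cons.injEq] at h
              obtain ⟨h1, h2⟩ := h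
              subst h1; subst h2
              exact ⟨rfl, by simp⟩
        · cases hBs : Bs with
          | false =>
            have hold : segCols matrix s e CP (w : Int) = [] := by
              by_contra hne
              have := hseen.2 hne
              rw [hBs] at this
              cases this
            simp [aStep, bStep, col_blank_eq, hb, hrun, hC]
            refine ⟨?_, ?_, ?_⟩
            · rcases hdisj with ⟨h1, h2⟩ | ⟨h1, h2, h3⟩
              · exact Or.inl ⟨h1, h2⟩
              · exact Or.inr ⟨h1, h2, by omega⟩
            · rw [hnew, hold]; simp
            · intro x t h
              rw [hnew, hold] at h
              simp only [List.nil_append, List.cons.injEq] at h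
              obtain ⟨h1, h2⟩ := h
              subst h1; subst h2
              exact ⟨rfl, by simp⟩
          | true =>
            rcases hsc : segCols matrix s e CP (w : Int) with _ | ⟨x0, t0⟩
            · exact absurd hsc (hseen.1 hBs)
            obtain ⟨hBm, hBM⟩ := hvals x0 t0 hsc
            simp [aStep, bStep, col_blank_eq, hb, hrun, hC]
            refine ⟨?_, ?_, ?_⟩
            · rcases hdisj with ⟨h1, h2⟩ | ⟨h1, h2, h3⟩
              · exact Or.inl ⟨h1, h2⟩
              · exact Or.inr ⟨h1, h2, by omega⟩
            · rw [hnew, hsc]; simp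
            · intro x t h
              rw [hnew, hsc] at h
              simp only [List.cons_append, List.cons.injEq] at h
              obtain ⟨h1, h2⟩ := h
              subst h1; subst h2
              exact ⟨hBm, (getLast_snoc x0 (w : Int) t0).symm⟩

-- ===== assembly =====

theorem a_eq (matrix : List (List String)) (s e g : Int)
    (h : ¬ (matrix = [] ∨ matrix.headD [] = [])) :
    split_vertical matrix s e g =
      (let width : Int := ((matrix.headD []).length : Int)
       let gaps := (ph1 matrix s e g (PySem.List.pyRange 0 width 1)).1
       if gaps = [] then
         match find_text_bounds matrix s e 0 width with
         | some b => [b]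
         | none => []
       else
         let st := ph2 matrix s e gaps
         if st.2 < width then
           match find_text_bounds matrix s e st.2 width with
           | some b => st.1 ++ [b]
           | none => st.1
         else st.1) := by
  rw [split_vertical, if_neg h, fvg_eq matrix s e g h]
  rfl


-- ===== VERDICT (by name: the statement is the Claim_ definition above) =====
theorem split_vertical_spec : Claim_equal_split_vertical := by
  intro matrix s e g _ _
  unfold Spec_split_vertical
  by_cases hguard : matrix = [] ∨ matrix.headD [] = []
  · rw [split_vertical, split_vertical_alt, if_pos hguard, if_pos hguard]
  · obtain ⟨hig, hgs, hout, hdisj, higinv, hseen, hvals⟩ :=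
      inv_all matrix s e g (matrix.headD []).length
    have hw : (1 : Int) ≤ ((matrix.headD []).length : Int) := by
      have h1 : matrix.headD [] ≠ [] := by tauto
      have h2 := List.length_pos_of_ne_nil h1
      exact_mod_cast h2
    rw [a_eq matrix s e g hguard, alt_eq matrix s e g hguard]
    dsimp only
    set W : Int := ((matrix.headD []).length : Int) with hW
    set G := ph1 matrix s e g (PySem.List.pyRange 0 W 1) with hG
    set B := bfold matrix s e g (PySem.List.pyRange 0 W 1) with hB
    set C := ph2 matrix s e G.1 with hC
    by_cases hgaps : G.1 = []
    · have hP : C.2 = 0 := by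
        rcases hdisj with ⟨_, h⟩ | ⟨hne, _⟩
        · exact h
        · exact absurd hgaps hne
      have hC1 : C.1 = [] := by rw [hC, hgaps]; rfl
      rw [if_pos hgaps, ftb_eq matrix s e 0 W (by omega)]
      rcases hsc : segCols matrix s e 0 W with _ | ⟨x, t⟩
      · have hseenF : B.2.2.2.1 = false := by
          cases hb : B.2.2.2.1 with
          | false => rfl
          | true => exact absurd (hP ▸ hsc) (hseen.1 hb)
        rw [hseenF, hout, hC1]
        simp [segOpt, hsc]
      · have hseenT : B.2.2.2.1 = true := by
          cases hb : B.2.2.2.1 with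
          | true => rfl
          | false =>
            have hcontra := hseen.2 (by rw [hP, hsc]; simp)
            simp [hb] at hcontra
        obtain ⟨hx, hlast⟩ := hvals x t (hP ▸ hsc)
        rw [hseenT, hout, hC1, hx, hlast]
        simp [segOpt, hsc]
    · obtain ⟨-, hP1, hPlt⟩ := hdisj.resolve_left (fun h => hgaps h.1)
      rw [if_neg hgaps]
      rw [if_pos hPlt, ftb_eq matrix s e C.2 W (by omega)]
      rcases hsc : segCols matrix s e C.2 W with _ | ⟨x, t⟩
      · have hseenF : B.2.2.2.1 = false := by
          cases hb : B.2.2.2.1 with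
          | false => rfl
          | true => exact absurd hsc (hseen.1 hb)
        rw [hseenF, hout]
        simp [segOpt, hsc]
      · have hseenT : B.2.2.2.1 = true := by
          cases hb : B.2.2.2.1 with
          | true => rfl
          | false =>
            have hcontra := hseen.2 (by rw [hsc]; simp)
            simp [hb] at hcontra
        obtain ⟨hx, hlast⟩ := hvals x t hsc
        rw [hseenT, hout, hx, hlast]
        simp [segOpt, hsc]
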